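-- pv_equiv track=rewrite | github.com/FlyHorse24/InternEvo | test_corner_case.py | order_result_J
-- ===== SOURCE A (Python) =====
-- def _get_deviceid_by_alignment(stage_id: int, stage_alignment:list) -> int:
--     for device_id in range(len(stage_alignment)):
--         for stage_in_device in stage_alignment[device_id]:
--             if stage_in_device == stage_id:
--                 return device_id
--
-- def order_result_J(input: str, stage_alignment: list) -> None:
--     input = input.replace("\n", "")
--     input = input.replace(" ", "")
--     device_steps = [[] for _ in range(len(stage_alignment))]
--     all_step = input.split('.')
--     for step in all_step:
--         start_time = step.split(',')[-1]
--         infor = step.split(',')[0]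
--         if infor is None or infor == '' or infor[0] not in ['b','w','f']:
--             continue
--         step_type, microbatch_id, stage_id = infor.split('_')
--         microbatch_id = int(microbatch_id)
--         stage_id = int(stage_id)
--         start_time = int(start_time)
--         device_id = _get_deviceid_by_alignment(stage_id, stage_alignment)
--         device_steps[device_id].append((step_type, microbatch_id, stage_id, start_time))
--     for d in range(len(stage_alignment)):
--         device_steps[d].sort(key=lambda x: x[3])
--
--     result = []
--     for stage_idx, stage_list in enumerate(device_steps):
--         new_stage_list = []
--         for current_tuple in stage_list:
--             op, mb_id, stage_id, time = current_tuple
--             new_stage_list.append((op, mb_id, stage_id))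
--         result.append(new_stage_list)
--     return result
-- ===== SOURCE B (Python) =====
-- def _stage_to_device(stage_alignment):
--     table = {}
--     for device_id, stages in enumerate(stage_alignment):
--         for s in stages:
--             table.setdefault(s, device_id)
--     return table
--
-- def _parse_step(step, table):
--     fields = step.split(',')
--     infor = fields[0]
--     if not infor or infor[0] not in 'bwf':
--         return None
--     parts = infor.split('_')
--     if len(parts) != 3:
--         return None
--     try:
--         mb, sid, t = int(parts[1]), int(parts[2]), int(fields[-1])
--     except ValueError:
--         return None
--     if sid not in table:
--         return None
--     return (t, table[sid], parts[0], mb, sid)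
--
-- def order_result_J(input, stage_alignment):
--     table = _stage_to_device(stage_alignment)
--     cleaned = input.replace("\n", "").replace(" ", "")
--     parsed = [p for p in (_parse_step(s, table) for s in cleaned.split('.')) if p is not None]
--     parsed.sort(key=lambda x: x[0])
--     result = [[] for _ in stage_alignment]
--     for _t, d, op, mb, sid in parsed:
--         result[d].append((op, mb, sid))
--     return result
-- ===== Notes on version B (the rewrite author's own statement) =====
-- stated objective: alternative
-- what changed: B precomputes a stage->device dictionary once (replacing A's per-step nested scan of stage_alignment), parses each step with a total helper returning None instead of threading mutable buckets, then does one global stable sort by time and a single distribution pass into per-device buckets, instead of A's append-into-buckets-then-sort-each-bucket.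
import Mathlib
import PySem

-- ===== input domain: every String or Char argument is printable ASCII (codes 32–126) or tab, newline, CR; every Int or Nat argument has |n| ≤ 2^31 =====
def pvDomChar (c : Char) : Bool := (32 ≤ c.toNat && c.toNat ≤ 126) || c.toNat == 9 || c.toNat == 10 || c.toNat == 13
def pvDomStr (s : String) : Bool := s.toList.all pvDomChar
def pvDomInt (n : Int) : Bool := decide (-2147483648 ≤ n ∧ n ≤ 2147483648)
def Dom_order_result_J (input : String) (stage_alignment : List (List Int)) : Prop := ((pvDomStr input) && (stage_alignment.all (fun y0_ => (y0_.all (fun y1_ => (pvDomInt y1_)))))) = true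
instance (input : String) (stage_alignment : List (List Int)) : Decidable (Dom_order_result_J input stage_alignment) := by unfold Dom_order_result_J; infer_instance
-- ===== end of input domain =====

-- B builds a stage->device dictionary once (no per-step scan of stage_alignment), parses each
-- step with a total Option-returning helper, then one global stable sort by time and a single
-- distribution pass into per-device buckets; alternative decomposition, not claimed faster.

-- ===== PORT A =====
-- A's helper _get_deviceid_by_alignment (nested for with early return; none = Python returns None)
def devLoop (stage_id : Int) : Nat → List (List Int) → Option Nat
  | _, [] => none
  | d, row :: rest => if row.contains stage_id then some d else devLoop stage_id (d + 1) rest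

-- loop body of A's parsing loop; state = device_steps, none = a raise in the Python
def bodyA (sa : List (List Int)) (acc : Option (List (List (String × Int × Int × Int)))) (step : List Char) :
    Option (List (List (String × Int × Int × Int))) :=
  acc.bind fun ds =>
    let fields := PySem.Chars.splitOn step [',']
    let start_time := PySem.List.pyGetD fields (-1) []
    let infor := PySem.List.pyGetD fields 0 []
    match infor with
    | [] => some ds
    | c :: _ =>
      if c ∈ ['b', 'w', 'f'] then
        match PySem.Chars.splitOn infor ['_'] with
        | [t, ms, ss] =>
          match PySem.Int.ofChars? ms, PySem.Int.ofChars? ss, PySem.Int.ofChars? start_time with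
          | some mb, some sid, some st =>
            match devLoop sid 0 sa with
            | some d =>
                some (PySem.List.pySetD ds (d : Int)
                  (PySem.List.pyGetD ds (d : Int) [] ++ [(String.ofList t, mb, sid, st)]))
            | none => none
          | _, _, _ => none
        | _ => none
      else some ds

def order_result_J (input : String) (stage_alignment : List (List Int)) : List (List (String × Int × Int)) :=
  let cleaned := PySem.Chars.replace (PySem.Chars.replace input.toList ['\n'] []) [' '] []
  let all_step := PySem.Chars.splitOn cleaned ['.']
  match all_step.foldl (bodyA stage_alignment) (some (List.replicate stage_alignment.length [])) with
  | none => []    -- unreachable under Pre_: the Python raises here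
  | some ds =>
    let sortedDs := ds.map (fun l => PySem.List.sorted l (fun x => x.2.2.2))
    sortedDs.map (fun l => l.map (fun x => (x.1, x.2.1, x.2.2.1)))

-- ===== PORT B =====
-- B's _stage_to_device: dict built once with setdefault (first device wins)
def stageToDev (sa : List (List Int)) : PySem.Dict Int Int :=
  (PySem.List.enumerate sa).foldl
    (fun tbl p => p.2.foldl (fun tbl s => PySem.Dict.setdefault tbl s p.1) tbl)
    PySem.Dict.empty

-- B's _parse_step: total, none = "continue"; result (t, device, op, mb, sid)
def parseStep (tbl : PySem.Dict Int Int) (step : List Char) : Option (Int × Int × String × Int × Int) :=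
  let fields := PySem.Chars.splitOn step [',']
  match PySem.List.pyGetD fields 0 [] with
  | [] => none
  | c :: cs =>
    if c ∈ ['b', 'w', 'f'] then
      match PySem.Chars.splitOn (c :: cs) ['_'] with
      | [op, ms, ss] =>
        match PySem.Int.ofChars? ms, PySem.Int.ofChars? ss,
              PySem.Int.ofChars? (PySem.List.pyGetD fields (-1) []) with
        | some mb, some sid, some t =>
          match PySem.Dict.get? tbl sid with
          | some d => some (t, d, String.ofList op, mb, sid)
          | none => none
        | _, _, _ => none
      | _ => none
    else none

def order_result_J_alt (input : String) (stage_alignment : List (List Int)) : List (List (String × Int × Int)) :=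
  let tbl := stageToDev stage_alignment
  let cleaned := PySem.Chars.replace (PySem.Chars.replace input.toList ['\n'] []) [' '] []
  let parsed := (PySem.Chars.splitOn cleaned ['.']).filterMap (parseStep tbl)
  let sortedP := PySem.List.sorted parsed (fun x => x.1)    -- one stable sort, key = time
  sortedP.foldl
    (fun res x => PySem.List.pySetD res x.2.1
      (PySem.List.pyGetD res x.2.1 [] ++ [(x.2.2.1, x.2.2.2.1, x.2.2.2.2)]))
    (List.replicate stage_alignment.length [])

-- ===== PRECONDITION & SPEC =====
-- Pre_ excludes exactly the inputs on which the Python A raises: a kept step whose info field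
-- does not split into exactly three '_'-parts, whose int() calls fail, or whose stage id is in
-- no device's alignment (then _get_deviceid_by_alignment returns None and indexing raises).
def preStep (sa : List (List Int)) (step : List Char) : Bool :=
  let fields := PySem.Chars.splitOn step [',']
  match PySem.List.pyGetD fields 0 [] with
  | [] => true
  | c :: _ =>
    if c ∈ ['b', 'w', 'f'] then
      match PySem.Chars.splitOn (PySem.List.pyGetD fields 0 []) ['_'] with
      | [_, ms, ss] =>
        match PySem.Int.ofChars? ms, PySem.Int.ofChars? ss,
              PySem.Int.ofChars? (PySem.List.pyGetD fields (-1) []) with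
        | some _, some sid, some _ => sa.any (fun row => row.contains sid)
        | _, _, _ => false
      | _ => false
    else true

def Pre_order_result_J (input : String) (stage_alignment : List (List Int)) : Prop :=
  ∀ step ∈ PySem.Chars.splitOn (PySem.Chars.replace (PySem.Chars.replace input.toList ['\n'] []) [' '] []) ['.'],
    preStep stage_alignment step = true

instance (input : String) (stage_alignment : List (List Int)) : Decidable (Pre_order_result_J input stage_alignment) := by
  unfold Pre_order_result_J; infer_instance

def pvWitness_order_result_J : String × List (List Int) :=
  ("f_0_1,7. b_1_0,3 .w_0_0,3.x,zz.", [[0], [1, 2]])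

def Spec_order_result_J (input : String) (stage_alignment : List (List Int)) (out : List (List (String × Int × Int))) : Prop := out = order_result_J_alt input stage_alignment
instance (input : String) (stage_alignment : List (List Int)) (out : List (List (String × Int × Int))) : Decidable (Spec_order_result_J input stage_alignment out) := by unfold Spec_order_result_J; infer_instance

-- ===== CLAIM (what is proved, stated in full; the proofs are below) =====
def Claim_equal_order_result_J : Prop := ∀ (input : String) (stage_alignment : List (List Int)), Dom_order_result_J input stage_alignment → Pre_order_result_J input stage_alignment → Spec_order_result_J input stage_alignment (order_result_J input stage_alignment)

-- ===== LEMMAS AND PROOFS =====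

-- projections relating B's 5-tuples (t, dev, op, mb, sid) to A's 4- and 3-tuples
def pvToA (r : Int × Int × String × Int × Int) : String × Int × Int × Int :=
  (r.2.2.1, r.2.2.2.1, r.2.2.2.2, r.1)

def pvTo3 (r : Int × Int × String × Int × Int) : String × Int × Int :=
  (r.2.2.1, r.2.2.2.1, r.2.2.2.2)

def pvBucket {β : Type} (n : Nat) (f : (Int × Int × String × Int × Int) → β)
    (flat : List (Int × Int × String × Int × Int)) : List (List β) :=
  (List.range n).map (fun (e : Nat) => ((flat.filter (fun x => x.2.1 == ((e : Nat) : Int))).map f))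

theorem pvBucket_nil {β : Type} (n : Nat) (f : (Int × Int × String × Int × Int) → β) :
    pvBucket n f [] = List.replicate n [] := by
  simp [pvBucket]

theorem devLoop_lt (sid : Int) (d0 : Nat) (rows : List (List Int)) (d : Nat)
    (h : devLoop sid d0 rows = some d) : d < d0 + rows.length := by
  induction rows generalizing d0 with
  | nil => simp [devLoop] at h
  | cons row rest ih =>
    simp only [devLoop] at h
    split at h
    · cases h
      simp only [List.length_cons]
      omega
    · have := ih (d0 + 1) h
      simp only [List.length_cons] at this ⊢
      omega

theorem devLoop_isSome (sid : Int) (d0 : Nat) (rows : List (List Int))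
    (h : rows.any (fun row => row.contains sid) = true) :
    ∃ d, devLoop sid d0 rows = some d := by
  induction rows generalizing d0 with
  | nil => simp at h
  | cons row rest ih =>
    by_cases hc : row.contains sid = true
    · refine ⟨d0, ?_⟩
      unfold devLoop
      rw [hc]
      simp
    · have h' : rest.any (fun r => r.contains sid) = true := by
        simp only [List.any_cons, Bool.or_eq_true] at h
        exact h.resolve_left hc
      obtain ⟨d, hd⟩ := ih h' (d0 := d0 + 1)
      have hc' : row.contains sid = false := by simpa using hc
      refine ⟨d, ?_⟩
      unfold devLoop
      rw [hc']
      simpa using hd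

-- the dictionary agrees with A's nested scan
def devLoopI (sid : Int) : Int → List (List Int) → Option Int
  | _, [] => none
  | d, row :: rest => if row.contains sid then some d else devLoopI sid (d + 1) rest

theorem get?_setdefault'' (tbl : PySem.Dict Int Int) (s d sid : Int) :
    PySem.Dict.get? (PySem.Dict.setdefault tbl s d) sid
      = (PySem.Dict.get? tbl sid).or (if sid = s then some d else none) := by
  cases hc : PySem.Dict.contains tbl s with
  | true =>
    rw [PySem.Dict.setdefault_of_contains tbl d hc]
    by_cases he : sid = s
    · subst he
      rw [PySem.Dict.contains_eq_isSome_get?] at hc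
      cases hg : PySem.Dict.get? tbl sid with
      | none => rw [hg] at hc; simp at hc
      | some v => simp
    · simp [he]
  | false =>
    rw [PySem.Dict.setdefault_of_not_contains tbl d hc]
    rw [PySem.Dict.get?_insert]
    by_cases he : sid = s
    · subst he
      rw [PySem.Dict.contains_eq_isSome_get?] at hc
      cases hg : PySem.Dict.get? tbl sid with
      | none => simp
      | some v => rw [hg] at hc; simp at hc
    · simp [he]

theorem get?_rowFold (row : List Int) (tbl : PySem.Dict Int Int) (d sid : Int) :
    PySem.Dict.get? (row.foldl (fun t s => PySem.Dict.setdefault t s d) tbl) sid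
      = (PySem.Dict.get? tbl sid).or (if row.contains sid then some d else none) := by
  induction row generalizing tbl with
  | nil => simp
  | cons s rest ih =>
    rw [List.foldl_cons, ih, get?_setdefault'']
    by_cases he : sid = s
    · subst he
      cases PySem.Dict.get? tbl sid <;> simp
    · have : (s == sid) = false := by simp [beq_iff_eq]; exact fun h => he h.symm
      cases PySem.Dict.get? tbl sid <;> simp [he, this, List.contains_cons]

theorem get?_build (rows : List (List Int)) (tbl : PySem.Dict Int Int) (d0 sid : Int) :
    PySem.Dict.get? ((PySem.List.enumerate rows d0).foldl
        (fun tbl p => p.2.foldl (fun tbl s => PySem.Dict.setdefault tbl s p.1) tbl) tbl) sid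
      = (PySem.Dict.get? tbl sid).or (devLoopI sid d0 rows) := by
  induction rows generalizing tbl d0 with
  | nil => simp [PySem.List.enumerate_nil, devLoopI]
  | cons row rest ih =>
    rw [PySem.List.enumerate_cons, List.foldl_cons, ih, get?_rowFold]
    rw [show devLoopI sid d0 (row :: rest)
          = if row.contains sid then some d0 else devLoopI sid (d0 + 1) rest from rfl]
    cases PySem.Dict.get? tbl sid with
    | some v => simp
    | none =>
      cases hc : row.contains sid with
      | true => simp [hc]
      | false => simp [hc]

theorem devLoopI_eq (sid : Int) (rows : List (List Int)) (n : Nat) :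
    devLoopI sid (n : Int) rows = (devLoop sid n rows).map (fun d => (d : Int)) := by
  induction rows generalizing n with
  | nil => simp [devLoopI, devLoop]
  | cons row rest ih =>
    unfold devLoopI devLoop
    cases hc : row.contains sid with
    | true => simp
    | false =>
      simp only [Bool.false_eq_true, if_false]
      have : ((n : Int) + 1) = ((n + 1 : Nat) : Int) := by push_cast; ring
      rw [this, ih]

theorem stageToDev_get? (sa : List (List Int)) (sid : Int) :
    PySem.Dict.get? (stageToDev sa) sid = (devLoop sid 0 sa).map (fun d => (d : Int)) := by
  unfold stageToDev
  rw [get?_build]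
  rw [show ((0 : Int) = ((0 : Nat) : Int)) from rfl, devLoopI_eq]
  simp

theorem pvBucket_snoc {β : Type} (n k : Nat) (f : (Int × Int × String × Int × Int) → β)
    (flat : List (Int × Int × String × Int × Int)) (r : Int × Int × String × Int × Int)
    (hk : k < n) (hr : r.2.1 = (k : Int)) :
    pvBucket n f (flat ++ [r]) =
      PySem.List.pySetD (pvBucket n f flat) ((k : Nat) : Int)
        (PySem.List.pyGetD (pvBucket n f flat) ((k : Nat) : Int) [] ++ [f r]) := by
  unfold pvBucket
  simp only [PySem.List.pySetD_natCast, PySem.List.pyGetD_natCast]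
  have hg : (((List.range n).map
      (fun (e : Nat) => ((flat.filter (fun x => x.2.1 == ((e : Nat) : Int))).map f))).getD k [])
      = (flat.filter (fun x => x.2.1 == (k : Int))).map f := by
    rw [List.getD_eq_getElem?_getD, List.getElem?_map, List.getElem?_range hk]
    rfl
  rw [hg]
  apply List.ext_getElem
  · simp
  · intro i h1 h2
    simp only [List.getElem_map, List.getElem_range, List.getElem_set]
    have hi : i < n := by simpa using h1
    by_cases he : k = i
    · subst he
      simp [List.filter_append, hr]
    · rw [if_neg he]
      have hne : ((r.2.1 == (i : Int)) = false) := by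
        simp [hr, beq_iff_eq]
        omega
      simp [List.filter_append, hne]

-- one step: under preStep, A's body appends exactly B's parse result to the buckets
theorem step_corr (sa : List (List Int)) (flat : List (Int × Int × String × Int × Int))
    (s : List Char) (hs : preStep sa s = true) :
    bodyA sa (some (pvBucket sa.length pvToA flat)) s
      = some (pvBucket sa.length pvToA (flat ++ (parseStep (stageToDev sa) s).toList)) := by
  unfold bodyA parseStep preStep at *
  simp only [Option.bind] at *
  cases h0 : PySem.List.pyGetD (PySem.Chars.splitOn s [',']) 0 [] with
  | nil => simp [h0]
  | cons c cs =>
    rw [h0] at hs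
    dsimp only [] at hs ⊢
    by_cases hc : c ∈ ['b', 'w', 'f']
    · rw [if_pos hc] at hs ⊢
      cases h1 : PySem.Chars.splitOn (c :: cs) ['_'] with
      | nil => rw [h1] at hs; cases hs
      | cons t rest1 =>
        cases rest1 with
        | nil => rw [h1] at hs; cases hs
        | cons ms rest2 =>
          cases rest2 with
          | nil => rw [h1] at hs; cases hs
          | cons ss rest3 =>
            cases rest3 with
            | cons a b => rw [h1] at hs; cases hs
            | nil =>
              rw [h1] at hs
              dsimp only [] at hs ⊢
              cases hmb : PySem.Int.ofChars? ms with
              | none => rw [hmb] at hs; cases hs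
              | some mb =>
                rw [hmb] at hs
                cases hsid : PySem.Int.ofChars? ss with
                | none => rw [hsid] at hs; cases hs
                | some sid =>
                  rw [hsid] at hs
                  cases hst : PySem.Int.ofChars? (PySem.List.pyGetD (PySem.Chars.splitOn s [',']) (-1) []) with
                  | none => rw [hst] at hs; cases hs
                  | some st =>
                    rw [hst] at hs
                    dsimp only [] at hs ⊢
                    obtain ⟨d, hdev⟩ := devLoop_isSome sid 0 sa hs
                    have hres : PySem.Dict.get? (stageToDev sa) sid = some ((d : Nat) : Int) := by
                      rw [stageToDev_get?, hdev]
                      rfl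
                    rw [hdev, hres]
                    simp only [if_pos hc, Option.toList_some]
                    have hlt : d < sa.length := by
                      have := devLoop_lt sid 0 sa d hdev; omega
                    rw [pvBucket_snoc sa.length d pvToA flat (st, (d : Int), String.ofList t, mb, sid) hlt rfl]
                    rfl
    · rw [if_neg hc] at hs ⊢
      simp [h0, hc]

theorem Astate (sa : List (List Int)) (steps : List (List Char))
    (flat : List (Int × Int × String × Int × Int))
    (h : ∀ s ∈ steps, preStep sa s = true) :
    steps.foldl (bodyA sa) (some (pvBucket sa.length pvToA flat))
      = some (pvBucket sa.length pvToA (flat ++ steps.filterMap (parseStep (stageToDev sa)))) := by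
  induction steps generalizing flat with
  | nil => simp
  | cons s rest ih =>
    rw [List.foldl_cons, step_corr sa flat s (h s (by simp)),
      ih (flat ++ (parseStep (stageToDev sa) s).toList) (fun x hx => h x (by simp [hx]))]
    cases hp : parseStep (stageToDev sa) s <;>
      simp [List.filterMap_cons, hp]

theorem parsed_dev_bound (sa : List (List Int)) (s : List Char)
    (r : Int × Int × String × Int × Int)
    (h : parseStep (stageToDev sa) s = some r) :
    ∃ k : Nat, r.2.1 = (k : Int) ∧ k < sa.length := by
  unfold parseStep at h
  dsimp only [] at h
  split at h
  · cases h
  · split at h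
    · split at h
      · split at h
        · rw [stageToDev_get?] at h
          cases hdev : devLoop _ 0 sa with
          | none => rw [hdev] at h; cases h
          | some d =>
            rw [hdev] at h
            dsimp only [Option.map] at h
            cases h
            exact ⟨d, rfl, by have := devLoop_lt _ 0 sa d hdev; omega⟩
        · cases h
      · cases h
    · cases h

theorem distribute (n : Nat) (l flat0 : List (Int × Int × String × Int × Int))
    (hb : ∀ r ∈ l, ∃ k : Nat, r.2.1 = (k : Int) ∧ k < n) :
    l.foldl
      (fun res x => PySem.List.pySetD res x.2.1
        (PySem.List.pyGetD res x.2.1 [] ++ [(x.2.2.1, x.2.2.2.1, x.2.2.2.2)]))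
      (pvBucket n pvTo3 flat0)
      = pvBucket n pvTo3 (flat0 ++ l) := by
  induction l generalizing flat0 with
  | nil => simp
  | cons x rest ih =>
    obtain ⟨k, hk, hkn⟩ := hb x (by simp)
    have h1 : PySem.List.pySetD (pvBucket n pvTo3 flat0) x.2.1
        (PySem.List.pyGetD (pvBucket n pvTo3 flat0) x.2.1 []
          ++ [(x.2.2.1, x.2.2.2.1, x.2.2.2.2)]) = pvBucket n pvTo3 (flat0 ++ [x]) := by
      rw [hk]
      exact (pvBucket_snoc n k pvTo3 flat0 x hkn hk).symm
    rw [List.foldl_cons, h1, ih (flat0 ++ [x]) (fun r hr => hb r (by simp [hr]))]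
    simp

-- insertBy / stable-sort lemmas
theorem insertBy_all_lt {α : Type} (k : α → Int) (x : α) (l : List α)
    (h : ∀ z ∈ l, k x < k z) :
    PySem.List.insertBy (fun a b => decide (k a < k b)) x l = x :: l := by
  cases l with
  | nil => rfl
  | cons y t => simp [PySem.List.insertBy, h y (by simp)]

theorem filter_insertBy {α : Type} (k : α → Int) (p : α → Bool) (x : α) (l : List α)
    (hs : l.Pairwise (fun a b => k a ≤ k b)) :
    (PySem.List.insertBy (fun a b => decide (k a < k b)) x l).filter p
      = if p x then PySem.List.insertBy (fun a b => decide (k a < k b)) x (l.filter p)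
        else l.filter p := by
  induction l with
  | nil => cases hp : p x <;> simp [PySem.List.insertBy, hp]
  | cons y t ih =>
    have hyt : ∀ z ∈ t, k y ≤ k z := (List.pairwise_cons.mp hs).1
    have hst : t.Pairwise (fun a b => k a ≤ k b) := (List.pairwise_cons.mp hs).2
    by_cases hxy : k x < k y
    · rw [show PySem.List.insertBy (fun a b => decide (k a < k b)) x (y :: t)
            = x :: y :: t by simp [PySem.List.insertBy, hxy]]
      cases hp : p x with
      | false => simp [List.filter_cons, hp]
      | true =>
        cases hpy : p y with
        | true =>
          simp only [List.filter_cons, hp, hpy, if_pos]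
          simp [PySem.List.insertBy, hxy]
        | false =>
          have hins := insertBy_all_lt k x (t.filter p)
            (fun z hz => lt_of_lt_of_le hxy (hyt z (List.mem_of_mem_filter hz)))
          simp [hp, hpy, hins]
    · rw [show PySem.List.insertBy (fun a b => decide (k a < k b)) x (y :: t)
            = y :: PySem.List.insertBy (fun a b => decide (k a < k b)) x t
          by simp [PySem.List.insertBy, hxy]]
      cases hp : p x with
      | false =>
        cases hpy : p y <;>
          simp [hp, hpy, ih hst]
      | true =>
        cases hpy : p y with
        | true =>
          simp only [List.filter_cons, hpy, ih hst, hp, if_pos]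
          simp [PySem.List.insertBy, hxy]
        | false =>
          simp [hpy, ih hst, hp]

theorem sorted_append_singleton {α : Type} (k : α → Int) (l : List α) (x : α) :
    PySem.List.sorted (l ++ [x]) k
      = PySem.List.insertBy (fun a b => decide (k a < k b)) x (PySem.List.sorted l k) := by
  rw [PySem.List.sorted_eq_foldl_insertBy, PySem.List.sorted_eq_foldl_insertBy, List.foldl_append]
  rfl

theorem sorted_filter {α : Type} (k : α → Int) (p : α → Bool) (l : List α) :
    (PySem.List.sorted l k).filter p = PySem.List.sorted (l.filter p) k := by
  induction l using List.reverseRecOn with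
  | nil => rfl
  | append_singleton l x ih =>
    rw [sorted_append_singleton, filter_insertBy k p x _ (PySem.List.sorted_pairwise l k),
      ih, List.filter_append]
    cases hp : p x with
    | false => simp [hp]
    | true =>
      rw [show List.filter p [x] = [x] by simp [hp], sorted_append_singleton]
      simp

theorem map_insertBy {α β : Type} (k : α → Int) (kb : β → Int) (f : α → β)
    (hk : ∀ a, kb (f a) = k a) (x : α) (l : List α) :
    (PySem.List.insertBy (fun a b => decide (k a < k b)) x l).map f
      = PySem.List.insertBy (fun a b => decide (kb a < kb b)) (f x) (l.map f) := by
  induction l with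
  | nil => rfl
  | cons y t ih =>
    simp only [List.map_cons, PySem.List.insertBy, hk]
    split <;> simp [ih]

theorem sorted_map {α β : Type} (k : α → Int) (kb : β → Int) (f : α → β)
    (hk : ∀ a, kb (f a) = k a) (l : List α) :
    PySem.List.sorted (l.map f) kb = (PySem.List.sorted l k).map f := by
  induction l using List.reverseRecOn with
  | nil => rfl
  | append_singleton l x ih =>
    rw [List.map_append, List.map_singleton, sorted_append_singleton,
      sorted_append_singleton, ih, map_insertBy k kb f hk]

theorem ports_agree (input : String) (sa : List (List Int))
    (hpre : Pre_order_result_J input sa) :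
    order_result_J input sa = order_result_J_alt input sa := by
  unfold Pre_order_result_J at hpre
  unfold order_result_J order_result_J_alt
  dsimp only []
  rw [show (List.replicate sa.length ([] : List (String × Int × Int × Int)))
        = pvBucket sa.length pvToA [] from (pvBucket_nil _ _).symm]
  rw [Astate sa _ [] hpre]
  dsimp only []
  rw [List.nil_append]
  set parsed := (PySem.Chars.splitOn
      (PySem.Chars.replace (PySem.Chars.replace input.toList ['\n'] []) [' '] [])
      ['.']).filterMap (parseStep (stageToDev sa)) with hparsed
  have hbound : ∀ r ∈ PySem.List.sorted parsed (fun x => x.1),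
      ∃ k : Nat, r.2.1 = (k : Int) ∧ k < sa.length := by
    intro r hr
    rw [PySem.List.mem_sorted] at hr
    rw [hparsed] at hr
    obtain ⟨s, _, hp⟩ := List.mem_filterMap.mp hr
    exact parsed_dev_bound sa s r hp
  rw [show (List.replicate sa.length ([] : List (String × Int × Int)))
        = pvBucket sa.length pvTo3 [] from (pvBucket_nil _ _).symm]
  rw [distribute sa.length _ [] hbound]
  rw [List.nil_append]
  unfold pvBucket
  rw [List.map_map, List.map_map]
  apply List.map_congr_left
  intro e _
  simp only [Function.comp]
  rw [sorted_filter (fun r => r.1) (fun x => x.2.1 == (e : Int)) parsed]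
  rw [sorted_map (fun r => r.1) (fun x => x.2.2.2) pvToA (fun a => rfl)]
  rw [List.map_map]
  rfl

-- ===== VERDICT (by name: the statement is the Claim_ definition above) =====
theorem order_result_J_spec : Claim_equal_order_result_J := by
  intro input sa _ hpre
  unfold Spec_order_result_J
  exact ports_agree input sa hpre
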